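-- pv_equiv track=rewrite | github.com/HITOfficial/College | ASD/Dynamic Greedy/tanagram.py | tanagram
-- ===== SOURCE A (Python) =====
-- from queue import PriorityQueue
--
-- def tanagram(x, y, t):
--     # only lower latino letters
--     # 26 priority queues -> a: 97, z: 122
--     A = [PriorityQueue() for _ in range(26)]
--     # adding every number into
--     for idx, letter in enumerate(x):
--         A[ord(letter)-97].put(idx)
--     for idx, letter in enumerate(y):
--         # empty queue
--         if A[ord(letter)-97].empty():
--             return False
--         x_idx = A[ord(letter)-97].get()
--         if t < abs(idx-x_idx):
--             return False
--     return True
-- ===== SOURCE B (Python) =====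
-- def _by_letter(s):
--     pos = [[] for _ in range(26)]
--     for i, c in enumerate(s):
--         pos[ord(c) - 97].append(i)
--     return pos
--
-- def tanagram(x, y, t):
--     # The k-th occurrence of a letter in y is necessarily matched with the
--     # k-th occurrence of that letter in x, so: bucket the positions of both
--     # strings by letter once, then do a letter-wise zipped comparison --
--     # no priority queues and no consumption state during a scan of y.
--     return all(
--         len(ys) <= len(xs) and all(abs(j - i) <= t for j, i in zip(ys, xs))
--         for xs, ys in zip(_by_letter(x), _by_letter(y))
--     )
-- ===== Notes on version B (the rewrite author's own statement) =====
-- stated objective: faster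
-- what changed: Instead of scanning y while consuming 26 PriorityQueues, B buckets the positions of BOTH strings by letter in two independent passes and then checks, letter by letter, that y has no more occurrences than x and that the zipped k-th occurrence pairs are within t -- there is no consumption state and no scan of y against a mutable table.
-- outside the precondition, e.g. on tanagram('', 'G!', 0): A returns False, B raises IndexError
import Mathlib
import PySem

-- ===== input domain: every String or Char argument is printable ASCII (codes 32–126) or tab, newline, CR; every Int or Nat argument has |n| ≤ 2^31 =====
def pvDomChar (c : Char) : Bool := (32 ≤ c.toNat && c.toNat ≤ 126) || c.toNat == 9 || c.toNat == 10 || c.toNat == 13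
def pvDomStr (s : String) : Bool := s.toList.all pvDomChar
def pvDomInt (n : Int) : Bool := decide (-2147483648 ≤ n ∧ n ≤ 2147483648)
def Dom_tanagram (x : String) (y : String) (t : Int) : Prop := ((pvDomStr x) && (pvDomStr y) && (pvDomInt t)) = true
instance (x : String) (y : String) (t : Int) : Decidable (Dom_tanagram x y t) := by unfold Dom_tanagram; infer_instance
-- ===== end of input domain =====

-- B replaces A's consuming scan of y against 26 PriorityQueues by two independent
-- bucketing passes (positions of each letter in x and in y) followed by a
-- letter-wise zipped comparison of k-th occurrences; objective: faster.

-- ===== PORT A =====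
-- PriorityQueue modeled as the list of its elements in insertion order:
-- put = append, empty = isEmpty, get = return and remove the minimum.
def pqPut (q : List Int) (v : Int) : List Int := q ++ [v]

-- first for-loop of A: A[ord(letter)-97].put(idx); none = IndexError
def tanagramBuild (A : List (List Int)) : List (Int × Char) → Option (List (List Int))
  | [] => some A
  | (idx, c) :: rest =>
    match PySem.List.pyGet? A ((c.toNat : Int) - 97) with
    | none => none
    | some q => tanagramBuild (PySem.List.pySetD A ((c.toNat : Int) - 97) (pqPut q idx)) rest

-- second for-loop of A; an IndexError (index outside the 26 queues) yields false,
-- those inputs are excluded by Pre_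
def tanagramLoop (t : Int) (A : List (List Int)) : List (Int × Char) → Bool
  | [] => true
  | (idx, c) :: rest =>
    match PySem.List.pyGet? A ((c.toNat : Int) - 97) with
    | none => false
    | some q =>
      if q.isEmpty then false
      else
        match q.min? with
        | none => false  -- unreachable: q is nonempty
        | some m =>
          if t < |idx - m| then false
          else tanagramLoop t (PySem.List.pySetD A ((c.toNat : Int) - 97) (q.erase m)) rest

def tanagram (x : String) (y : String) (t : Int) : Bool :=
  match tanagramBuild (List.replicate 26 []) (PySem.List.enumerate x.toList 0) with
  | none => false  -- IndexError in the first loop, excluded by Pre_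
  | some A => tanagramLoop t A (PySem.List.enumerate y.toList 0)

-- ===== PORT B =====
-- _by_letter of Source B: pos[ord(c)-97].append(i); none = IndexError (excluded by Pre_)
def byLetter (pos : List (List Int)) : List (Int × Char) → Option (List (List Int))
  | [] => some pos
  | (i, c) :: rest =>
    match PySem.List.pyGet? pos ((c.toNat : Int) - 97) with
    | none => none
    | some lst => byLetter (PySem.List.pySetD pos ((c.toNat : Int) - 97) (lst ++ [i])) rest

-- the per-letter body of Source B's outer all(...)
def bucketCheck (t : Int) (xs ys : List Int) : Bool :=
  decide (ys.length ≤ xs.length) && (ys.zip xs).all (fun q => decide (|q.1 - q.2| ≤ t))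

def tanagram_alt (x : String) (y : String) (t : Int) : Bool :=
  match byLetter (List.replicate 26 []) (PySem.List.enumerate x.toList 0),
        byLetter (List.replicate 26 []) (PySem.List.enumerate y.toList 0) with
  | some xpos, some ypos => (xpos.zip ypos).all (fun p => bucketCheck t p.1 p.2)
  | _, _ => false  -- IndexError in a bucketing pass, excluded by Pre_

-- ===== PRECONDITION & SPEC =====
-- Pre_ excludes inputs containing a character outside 'G'..'z' (codes 71–122, the
-- indices ord(c)-97 Python's 26-element list accepts, negative ones wrapping around):
-- on such inputs A raises IndexError, except when an earlier mismatch in y makes A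
-- return False before the offending character is reached (B raises there too, just
-- without A's accidental early escape).
def Pre_tanagram (x : String) (y : String) (t : Int) : Prop :=
  (x.toList.all (fun c => 71 ≤ c.toNat && c.toNat ≤ 122) = true) ∧
  (y.toList.all (fun c => 71 ≤ c.toNat && c.toNat ≤ 122) = true)
instance (x : String) (y : String) (t : Int) : Decidable (Pre_tanagram x y t) := by unfold Pre_tanagram; infer_instance
def pvWitness_tanagram : String × String × Int := ("ab", "ba", 1)

def Spec_tanagram (x : String) (y : String) (t : Int) (out : Bool) : Prop := out = tanagram_alt x y t
instance (x : String) (y : String) (t : Int) (out : Bool) : Decidable (Spec_tanagram x y t out) := by unfold Spec_tanagram; infer_instance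

-- ===== CLAIM (what is proved, stated in full; the proofs are below) =====
def Claim_equal_tanagram : Prop := ∀ (x : String) (y : String) (t : Int), Dom_tanagram x y t → Pre_tanagram x y t → Spec_tanagram x y t (tanagram x y t)

-- ===== LEMMAS AND PROOFS =====

-- positions (first components) of the entries of l whose letter falls in bucket n
def groupPos (n : Nat) (l : List (Int × Char)) : List Int :=
  (l.filter (fun p => PySem.List.pyIdx? 26 ((p.2.toNat : Int) - 97) == some n)).map Prod.fst

lemma pyIdx?_lt {n : Nat} {i : Int} {k : Nat} (h : PySem.List.pyIdx? n i = some k) : k < n := by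
  unfold PySem.List.pyIdx? at h
  split_ifs at h with h1 h2 h3
  · injection h with h; omega
  · injection h with h; omega

lemma pyGet?_eq_bind {α : Type} (xs : List α) (i : Int) :
    PySem.List.pyGet? xs i = (PySem.List.pyIdx? xs.length i).bind (fun k => xs[k]?) := rfl

lemma pySetD_eq {α : Type} (xs : List α) (i : Int) (v : α) :
    PySem.List.pySetD xs i v =
      match PySem.List.pyIdx? xs.length i with
      | none => xs
      | some k => xs.set k v := by
  unfold PySem.List.pySetD PySem.List.pySet?
  cases PySem.List.pyIdx? xs.length i <;> rfl

lemma mem_pySetD {α : Type} {xs : List α} {i : Int} {v a : α}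
    (h : a ∈ PySem.List.pySetD xs i v) : a ∈ xs ∨ a = v := by
  rw [pySetD_eq] at h
  split at h
  · exact Or.inl h
  · exact List.mem_or_eq_of_mem_set h

lemma all_congr_mem {α : Type} (l : List α) (f g : α → Bool)
    (h : ∀ x ∈ l, f x = g x) : l.all f = l.all g := by
  induction l with
  | nil => rfl
  | cons a l ih =>
    simp only [List.all_cons, h a List.mem_cons_self,
      ih (fun x hx => h x (List.mem_cons_of_mem a hx))]

lemma idx_valid {c : Char} (h : (71 ≤ c.toNat && c.toNat ≤ 122) = true) :
    ∃ n : Nat, PySem.List.pyIdx? 26 ((c.toNat : Int) - 97) = some n := by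
  unfold PySem.List.pyIdx?
  simp only [Bool.and_eq_true, decide_eq_true_eq] at h
  split_ifs with h1 h2 h3
  · exact ⟨_, rfl⟩
  · omega
  · exact ⟨_, rfl⟩
  · omega

-- the two first loops are the same bucketing pass
lemma build_eq (l : List (Int × Char)) : ∀ (A : List (List Int)),
    tanagramBuild A l = byLetter A l := by
  induction l with
  | nil => intro A; rfl
  | cons hd tl ih =>
    intro A
    obtain ⟨idx, c⟩ := hd
    simp only [tanagramBuild, byLetter, pqPut]
    cases PySem.List.pyGet? A ((c.toNat : Int) - 97) with
    | none => rfl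
    | some q => exact ih _

-- whenever the bucketing pass returns, every bucket is strictly increasing
lemma build_inv (xs : List Char) : ∀ (s : Int) (A A' : List (List Int)),
    A.length = 26 →
    (∀ q ∈ A, q.Pairwise (· < ·) ∧ ∀ v ∈ q, v < s) →
    byLetter A (PySem.List.enumerate xs s) = some A' →
    A'.length = 26 ∧ ∀ q ∈ A', q.Pairwise (· < ·) := by
  induction xs with
  | nil =>
    intro s A A' hlen hq h
    simp [PySem.List.enumerate, byLetter] at h
    subst h
    exact ⟨hlen, fun q hmem => (hq q hmem).1⟩
  | cons c cs ih =>
    intro s A A' hlen hq h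
    have henum : PySem.List.enumerate (c :: cs) s = (s, c) :: PySem.List.enumerate cs (s + 1) := by
      simp [PySem.List.enumerate]
    rw [henum] at h
    simp only [byLetter] at h
    cases hg : PySem.List.pyGet? A ((c.toNat : Int) - 97) with
    | none => rw [hg] at h; exact absurd h (by simp)
    | some q =>
      rw [hg] at h
      refine ih (s + 1) _ A' (by rw [PySem.List.length_pySetD]; exact hlen) ?_ h
      intro q' hmem
      have hq' := mem_pySetD hmem
      rcases hq' with hq' | hq'
      · obtain ⟨h1, h2⟩ := hq q' hq'
        exact ⟨h1, fun v hv => by have := h2 v hv; omega⟩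
      · subst hq'
        have hmemq : q ∈ A := PySem.List.mem_of_pyGet?_eq_some A hg
        obtain ⟨h1, h2⟩ := hq q hmemq
        constructor
        · rw [List.pairwise_append]
          exact ⟨h1, List.pairwise_singleton _ _, fun a ha b hb => by
            simp at hb; subst hb; exact h2 a ha⟩
        · intro v hv
          rcases List.mem_append.mp hv with hv | hv
          · have := h2 v hv; omega
          · simp at hv; omega

-- the bucketing pass succeeds on valid entries and computes groupPos bucketwise
lemma byLetter_spec (l : List (Int × Char)) : ∀ (B : List (List Int)),
    B.length = 26 →
    (∀ p ∈ l, ∃ n : Nat, PySem.List.pyIdx? 26 ((p.2.toNat : Int) - 97) = some n) →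
    ∃ B', byLetter B l = some B' ∧ B'.length = 26 ∧
      ∀ n : Nat, n < 26 → B'[n]? = some (B.getD n [] ++ groupPos n l) := by
  induction l with
  | nil =>
    intro B hB _
    refine ⟨B, rfl, hB, fun n hn => ?_⟩
    have hn' : n < B.length := by omega
    rw [List.getElem?_eq_getElem hn', List.getD_eq_getElem B [] hn']
    simp [groupPos]
  | cons hd rest ih =>
    intro B hB hval
    obtain ⟨i, c⟩ := hd
    obtain ⟨k, hk⟩ := hval (i, c) List.mem_cons_self
    have hklt : k < 26 := pyIdx?_lt hk
    have hget : PySem.List.pyGet? B ((c.toNat : Int) - 97) = some (B.getD k []) := by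
      rw [pyGet?_eq_bind, hB, hk, Option.bind_some,
        List.getElem?_eq_getElem (by omega : k < B.length), List.getD_eq_getElem B [] (by omega)]
    have hset : PySem.List.pySetD B ((c.toNat : Int) - 97) (B.getD k [] ++ [i])
        = B.set k (B.getD k [] ++ [i]) := by
      rw [pySetD_eq, hB, hk]
    simp only [byLetter, hget, hset]
    obtain ⟨B', hB', hlen', hspec⟩ := ih (B.set k (B.getD k [] ++ [i]))
      (by simpa using hB) (fun p hp => hval p (List.mem_cons_of_mem _ hp))
    refine ⟨B', hB', hlen', fun n hn => ?_⟩
    rw [hspec n hn]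
    by_cases hnk : n = k
    · subst hnk
      have : (B.set n (B.getD n [] ++ [i])).getD n [] = B.getD n [] ++ [i] := by
        rw [List.getD_eq_getElem _ [] (by simpa using (by omega : n < B.length)),
          List.getElem_set_self]
      rw [this]
      have hgrp : groupPos n ((i, c) :: rest) = i :: groupPos n rest := by
        simp [groupPos, hk]
      rw [hgrp, List.append_assoc]
      rfl
    · have : (B.set k (B.getD k [] ++ [i])).getD n [] = B.getD n [] := by
        rcases Nat.lt_or_ge n B.length with hlt | hge
        · rw [List.getD_eq_getElem _ [] (by simpa using hlt),
            List.getElem_set_ne (by omega), List.getD_eq_getElem _ [] hlt]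
        · rw [List.getD_eq_default _ [] (by simpa using hge), List.getD_eq_default _ [] hge]
      rw [this]
      have hgrp : groupPos n ((i, c) :: rest) = groupPos n rest := by
        simp [groupPos, List.filter_cons, hk]
        rw [if_neg (fun h => hnk h.symm)]
      rw [hgrp]

-- A's consuming scan equals the bucketwise zipped comparison
lemma loop_vs_check (t : Int) (ys : List (Int × Char)) : ∀ (A : List (List Int)),
    A.length = 26 →
    (∀ q ∈ A, q.Pairwise (· < ·)) →
    (∀ p ∈ ys, ∃ n : Nat, PySem.List.pyIdx? 26 ((p.2.toNat : Int) - 97) = some n) →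
    tanagramLoop t A ys =
      (List.range 26).all (fun n => bucketCheck t (A.getD n []) (groupPos n ys)) := by
  induction ys with
  | nil =>
    intro A _ _ _
    simp [tanagramLoop, bucketCheck, groupPos]
  | cons hd rest ih =>
    intro A hA hsort hval
    obtain ⟨j, c⟩ := hd
    obtain ⟨k, hk⟩ := hval (j, c) List.mem_cons_self
    have hklt : k < 26 := pyIdx?_lt hk
    have hkA : k < A.length := by omega
    have hget : PySem.List.pyGet? A ((c.toNat : Int) - 97) = some (A.getD k []) := by
      rw [pyGet?_eq_bind, hA, hk, Option.bind_some,
        List.getElem?_eq_getElem hkA, List.getD_eq_getElem A [] hkA]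
    have hgrpk : groupPos k ((j, c) :: rest) = j :: groupPos k rest := by
      simp [groupPos, hk]
    have hgrpne : ∀ n : Nat, n ≠ k → groupPos n ((j, c) :: rest) = groupPos n rest := by
      intro n hnk
      simp only [groupPos, List.filter_cons, hk]
      simp only [beq_iff_eq, Option.some.injEq]
      rw [if_neg (fun h => hnk h.symm)]
    simp only [tanagramLoop, hget]
    cases hq : A.getD k [] with
    | nil =>
      simp only [List.isEmpty_nil, if_true]
      symm
      rw [List.all_eq_false]
      refine ⟨k, List.mem_range.mpr hklt, ?_⟩
      show ¬ bucketCheck t (A.getD k []) (groupPos k ((j, c) :: rest)) = true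
      rw [hq, hgrpk]
      simp [bucketCheck]
    | cons h0 tl =>
      have hsorted : (h0 :: tl).Pairwise (· < ·) := by
        rw [← hq, List.getD_eq_getElem A [] hkA]; exact hsort _ (List.getElem_mem hkA)
      have hmin : (h0 :: tl).min? = some h0 := by
        rw [List.min?_eq_some_iff]
        refine ⟨List.mem_cons_self, fun b hb => ?_⟩
        rcases List.mem_cons.mp hb with hb | hb
        · omega
        · exact le_of_lt ((List.pairwise_cons.mp hsorted).1 b hb)
      simp only [List.isEmpty_cons, Bool.false_eq_true, if_false, hmin]
      by_cases habs : t < |j - h0|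
      · rw [if_pos habs]
        symm
        rw [List.all_eq_false]
        refine ⟨k, List.mem_range.mpr hklt, ?_⟩
        show ¬ bucketCheck t (A.getD k []) (groupPos k ((j, c) :: rest)) = true
        rw [hq, hgrpk]
        simp [bucketCheck, not_le.mpr habs]
      · rw [if_neg habs]
        have hset : PySem.List.pySetD A ((c.toNat : Int) - 97) ((h0 :: tl).erase h0)
            = A.set k tl := by
          rw [pySetD_eq, hA, hk, List.erase_cons_head]
        rw [hset]
        rw [ih (A.set k tl) (by simpa using hA)
          (fun q' hq' => by
            rcases List.mem_or_eq_of_mem_set hq' with hmem | heq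
            · exact hsort q' hmem
            · subst heq; exact (List.pairwise_cons.mp hsorted).2)
          (fun p hp => hval p (List.mem_cons_of_mem _ hp))]
        apply all_congr_mem
        intro n hn
        have hn26 : n < 26 := List.mem_range.mp hn
        by_cases hnk : n = k
        · subst hnk
          have hsetget : (A.set n tl).getD n [] = tl := by
            rw [List.getD_eq_getElem _ [] (by simpa using hkA), List.getElem_set_self]
          rw [hsetget, hq, hgrpk]
          simp only [bucketCheck, List.zip_cons_cons, List.all_cons, List.length_cons]
          have : |j - h0| ≤ t := not_lt.mp habs
          simp [this]
        · have hsetget : (A.set k tl).getD n [] = A.getD n [] := by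
            rcases Nat.lt_or_ge n A.length with hlt | hge
            · rw [List.getD_eq_getElem _ [] (by simpa using hlt),
                List.getElem_set_ne (by omega), List.getD_eq_getElem _ [] hlt]
            · rw [List.getD_eq_default _ [] (by simpa using hge), List.getD_eq_default _ [] hge]
          rw [hsetget, hgrpne n hnk]

-- zipped all over two equal-length lists = indexed all
lemma zip_all_eq_range {α β : Type} (d1 : α) (d2 : β) (f : α × β → Bool) :
    ∀ (l1 : List α) (l2 : List β), l1.length = l2.length →
    (l1.zip l2).all f = (List.range l1.length).all (fun n => f (l1.getD n d1, l2.getD n d2)) := by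
  intro l1
  induction l1 with
  | nil => intro l2 h; rfl
  | cons a l1 ih =>
    intro l2 h
    cases l2 with
    | nil => simp at h
    | cons b l2 =>
      simp only [List.zip_cons_cons, List.all_cons, List.length_cons,
        List.range_succ_eq_map, List.all_map]
      simp only [List.getD_cons_zero]
      rw [ih l2 (by simpa using h)]
      rfl

-- ===== VERDICT (by name: the statement is the Claim_ definition above) =====
theorem tanagram_spec : Claim_equal_tanagram := by
  intro x y t _ hpre
  unfold Spec_tanagram tanagram tanagram_alt
  rw [build_eq]
  cases hb : byLetter (List.replicate 26 []) (PySem.List.enumerate x.toList 0) with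
  | none => rfl
  | some xpos =>
    have hvaly : ∀ p ∈ PySem.List.enumerate y.toList 0,
        ∃ n : Nat, PySem.List.pyIdx? 26 ((p.2.toNat : Int) - 97) = some n := by
      intro p hp
      apply idx_valid
      have hmem : p.2 ∈ y.toList := by
        obtain ⟨k, hk, hpe⟩ := (PySem.List.mem_enumerate_iff _ _ _).mp hp
        subst hpe
        exact List.getElem_mem hk
      exact (List.all_eq_true.mp hpre.2) p.2 hmem
    obtain ⟨ypos, hy, hylen, hyspec⟩ := byLetter_spec _ (List.replicate 26 []) (by simp) hvaly
    rw [hy]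
    show tanagramLoop t xpos (PySem.List.enumerate y.toList 0)
        = (xpos.zip ypos).all (fun p => bucketCheck t p.1 p.2)
    obtain ⟨hxlen, hxsorted⟩ := build_inv x.toList 0 _ xpos (by simp)
      (by intro q hq; simp at hq; subst hq; simp) hb
    rw [loop_vs_check t _ xpos hxlen hxsorted hvaly]
    rw [zip_all_eq_range [] [] _ xpos ypos (by rw [hxlen, hylen]), hxlen]
    apply all_congr_mem
    intro n hn
    have hn26 : n < 26 := List.mem_range.mp hn
    rw [List.getD_eq_getElem?_getD (l := ypos), hyspec n hn26]
    have hrep : (List.replicate 26 ([] : List Int)).getD n [] = [] := by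
      rw [List.getD_eq_getElem _ [] (by simpa using hn26), List.getElem_replicate]
    rw [Option.getD_some, hrep, List.nil_append]
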